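-- pv_equiv track=rewrite | github.com/mingzhu0527/code_processing | utils/extract_function_utils.py | check_cross_call
-- ===== SOURCE A (Python) =====
-- def check_cross_call(call_dict, function_names):
--     black_set = set()
--     for key, calls_set in call_dict.items():
--         for fn in function_names:
--             if fn != key:
--                 if fn in calls_set:
--                     black_set.add(fn)
--     target_fns = []
--     for fn in function_names:
--         if fn not in black_set:
--             target_fns.append(fn)
--     return target_fns
-- ===== SOURCE B (Python) =====
-- def check_cross_call(call_dict, function_names):
--     return [fn for fn in function_names
--             if not any(fn in calls for key, calls in call_dict.items() if key != fn)]
-- ===== Notes on version B (the rewrite author's own statement) =====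
-- stated objective: simpler
-- what changed: Drops the two-phase build-blacklist-then-filter structure: B is a single filtering comprehension that re-scans call_dict per function with an existential any(), maintaining no intermediate set.
import Mathlib
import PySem

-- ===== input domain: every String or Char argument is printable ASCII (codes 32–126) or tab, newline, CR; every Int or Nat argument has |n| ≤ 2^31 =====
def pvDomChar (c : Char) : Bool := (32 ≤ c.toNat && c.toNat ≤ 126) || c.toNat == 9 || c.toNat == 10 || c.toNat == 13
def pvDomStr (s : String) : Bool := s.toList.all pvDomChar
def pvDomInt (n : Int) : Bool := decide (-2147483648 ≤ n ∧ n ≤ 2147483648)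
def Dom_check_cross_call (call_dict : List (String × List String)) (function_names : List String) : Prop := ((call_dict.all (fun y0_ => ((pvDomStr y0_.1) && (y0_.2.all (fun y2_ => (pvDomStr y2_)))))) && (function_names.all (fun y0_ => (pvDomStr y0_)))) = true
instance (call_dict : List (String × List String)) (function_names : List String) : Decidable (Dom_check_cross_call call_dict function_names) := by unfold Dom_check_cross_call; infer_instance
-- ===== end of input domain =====

-- B replaces A's build-blacklist-then-filter two-phase loop by a single filtering pass
-- with an existential scan of call_dict per function (simpler decomposition, same cost).


-- ===== PORT A =====
-- black_set built by the double loop over call_dict items and function_names,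
-- then a second pass appends each fn not in black_set.
def check_cross_call (call_dict : List (String × List String)) (function_names : List String) : List String :=
  let black_set : PySem.Set String :=
    call_dict.foldl (fun bs kc =>
      function_names.foldl (fun bs fn =>
        if fn ≠ kc.1 then
          if fn ∈ kc.2 then PySem.Set.add bs fn else bs
        else bs) bs) PySem.Set.empty
  function_names.foldl (fun acc fn =>
    if ¬ (PySem.Set.contains black_set fn = true) then acc ++ [fn] else acc) []

-- ===== PORT B =====
-- single filter with an existential any() over call_dict; no intermediate set.
def check_cross_call_alt (call_dict : List (String × List String)) (function_names : List String) : List String :=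
  function_names.filter (fun fn =>
    ! call_dict.any (fun kc => kc.1 != fn && kc.2.contains fn))

-- ===== PRECONDITION & SPEC =====
def Spec_check_cross_call (call_dict : List (String × List String)) (function_names : List String) (out : List String) : Prop := out = check_cross_call_alt call_dict function_names
instance (call_dict : List (String × List String)) (function_names : List String) (out : List String) : Decidable (Spec_check_cross_call call_dict function_names out) := by unfold Spec_check_cross_call; infer_instance

-- ===== CLAIM (what is proved, stated in full; the proofs are below) =====
def Claim_equal_check_cross_call : Prop := ∀ (call_dict : List (String × List String)) (function_names : List String), Dom_check_cross_call call_dict function_names → Spec_check_cross_call call_dict function_names (check_cross_call call_dict function_names)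

-- ===== LEMMAS AND PROOFS =====

-- membership in the inner loop's accumulator
theorem mem_inner (key : String) (calls : List String) (fns : List String)
    (bs : PySem.Set String) (x : String) :
    x ∈ fns.foldl (fun bs fn =>
        if fn ≠ key then (if fn ∈ calls then PySem.Set.add bs fn else bs) else bs) bs ↔
      x ∈ bs ∨ (x ∈ fns ∧ x ≠ key ∧ x ∈ calls) := by
  induction fns generalizing bs with
  | nil => simp
  | cons f t ih =>
    simp only [List.foldl_cons, List.mem_cons]
    rw [ih]
    by_cases h1 : f ≠ key
    · by_cases h2 : f ∈ calls
      · simp only [if_pos h1, if_pos h2, PySem.Set.mem_add]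
        constructor
        · rintro ((h | rfl) | ⟨ht, hk, hc⟩)
          · exact Or.inl h
          · exact Or.inr ⟨Or.inl rfl, h1, h2⟩
          · exact Or.inr ⟨Or.inr ht, hk, hc⟩
        · rintro (h | ⟨(rfl | ht), hk, hc⟩)
          · exact Or.inl (Or.inl h)
          · exact Or.inl (Or.inr rfl)
          · exact Or.inr ⟨ht, hk, hc⟩
      · simp only [if_pos h1, if_neg h2]
        constructor
        · rintro (h | ⟨ht, hk, hc⟩)
          · exact Or.inl h
          · exact Or.inr ⟨Or.inr ht, hk, hc⟩
        · rintro (h | ⟨(rfl | ht), hk, hc⟩)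
          · exact Or.inl h
          · exact absurd hc h2
          · exact Or.inr ⟨ht, hk, hc⟩
    · simp only [if_neg h1]
      rw [not_not] at h1
      constructor
      · rintro (h | ⟨ht, hk, hc⟩)
        · exact Or.inl h
        · exact Or.inr ⟨Or.inr ht, hk, hc⟩
      · rintro (h | ⟨(rfl | ht), hk, hc⟩)
        · exact Or.inl h
        · exact absurd h1 hk
        · exact Or.inr ⟨ht, hk, hc⟩

-- membership in black_set
theorem mem_black (call_dict : List (String × List String)) (fns : List String)
    (bs : PySem.Set String) (x : String) :
    x ∈ call_dict.foldl (fun bs kc =>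
        fns.foldl (fun bs fn =>
          if fn ≠ kc.1 then (if fn ∈ kc.2 then PySem.Set.add bs fn else bs) else bs) bs) bs ↔
      x ∈ bs ∨ ∃ kc ∈ call_dict, x ∈ fns ∧ x ≠ kc.1 ∧ x ∈ kc.2 := by
  induction call_dict generalizing bs with
  | nil => simp
  | cons kc t ih =>
    simp only [List.foldl_cons, List.mem_cons]
    rw [ih, mem_inner]
    constructor
    · rintro ((h | h) | ⟨kc', hm, h⟩)
      · tauto
      · exact Or.inr ⟨kc, Or.inl rfl, h⟩
      · exact Or.inr ⟨kc', Or.inr hm, h⟩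
    · rintro (h | ⟨kc', (rfl | hm), h⟩)
      · tauto
      · exact Or.inl (Or.inr h)
      · exact Or.inr ⟨kc', hm, h⟩

-- ===== VERDICT (by name: the statement is the Claim_ definition above) =====
theorem check_cross_call_spec : Claim_equal_check_cross_call := by
  intro call_dict function_names _
  unfold Spec_check_cross_call
  simp only [check_cross_call, check_cross_call_alt]
  rw [PySem.List.foldl_append_ite_eq_filter]
  simp only [List.nil_append]
  apply List.filter_congr
  intro fn hfn
  have hb : PySem.Set.contains
      (call_dict.foldl (fun bs kc =>
        function_names.foldl (fun bs f =>
          if f ≠ kc.1 then (if f ∈ kc.2 then PySem.Set.add bs f else bs) else bs) bs)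
        PySem.Set.empty) fn
      = call_dict.any (fun kc => kc.1 != fn && kc.2.contains fn) := by
    rw [Bool.eq_iff_iff, PySem.Set.contains_iff, mem_black, List.any_eq_true]
    simp only [PySem.Set.empty, List.not_mem_nil, false_or, Bool.and_eq_true,
      bne_iff_ne, List.contains_iff_mem]
    constructor
    · rintro ⟨kc, hm, _, hne, hc⟩
      exact ⟨kc, hm, Ne.symm hne, hc⟩
    · rintro ⟨kc, hm, hne, hc⟩
      exact ⟨kc, hm, hfn, Ne.symm hne, hc⟩
  simp only [hb]
  simp
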